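-- pv_equiv track=rewrite | github.com/dapkunayte/digital-academy | venv/junior.py | three_words
-- ===== SOURCE A (Python) =====
-- def three_words(string)->bool:
--     str_split = string.split(sep=' ')
--     words_counter = 0
--     for i in str_split:
--         if words_counter>=3:
--             return True
--             break
--         elif i.isdigit():
--             words_counter=0
--         else:
--             words_counter+=1
--
--     if words_counter<=3:
--         return False
-- ===== SOURCE B (Python) =====
-- def three_words(string) -> bool:
--     words = string.split(sep=' ')
--     return any(not words[i].isdigit() and not words[i + 1].isdigit()
--                and not words[i + 2].isdigit()
--                for i in range(len(words) - 2))
-- ===== Notes on version B (the rewrite author's own statement) =====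
-- stated objective: simpler
-- what changed: Replaced the stateful reset-counter scan with a declarative any() over fixed 3-word windows, and fixed the off-by-one by which A demands a fourth word after the run of three.
-- intended difference: On strings whose only run of three consecutive non-digit words sits at the very end (nothing after it), A returns False because its counter>=3 test only fires on a following loop iteration, while B returns True, which is the intended detection of a run of three consecutive non-digit words. — e.g. on three_words("a b c"): A returns false, B returns true
import Mathlib
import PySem

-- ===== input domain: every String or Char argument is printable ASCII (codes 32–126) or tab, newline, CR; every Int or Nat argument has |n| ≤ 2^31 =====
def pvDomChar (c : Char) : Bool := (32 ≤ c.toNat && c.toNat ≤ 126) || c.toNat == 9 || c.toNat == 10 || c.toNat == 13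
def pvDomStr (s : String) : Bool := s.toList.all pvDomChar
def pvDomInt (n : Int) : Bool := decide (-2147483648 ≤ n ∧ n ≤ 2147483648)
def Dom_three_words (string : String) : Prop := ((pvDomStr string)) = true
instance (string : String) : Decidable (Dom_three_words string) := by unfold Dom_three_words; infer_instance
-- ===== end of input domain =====

-- B replaces A's stateful reset-counter scan by an any() over fixed 3-word windows (simpler),
-- and returns True when the run of three non-digit words ends the string, where A returns False (see D_).

-- string.split(sep=' '), shared by both ports (sep ≠ "", so split? is some)
def pvWords (s : String) : List String := (PySem.Str.split? s " ").getD []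

-- ===== PORT A =====
-- the for-loop with early return; the counter is a Python int.
-- On loop exhaustion Python runs 'if words_counter<=3: return False'; the counter never
-- exceeds 3 (it is only bumped when < 3), so the implicit-None fall-through is unreachable
-- and the exhaustion case is ported as 'false'.
def three_words_loop : List String → Int → Bool
  | [], _ => false
  | w :: ws, c =>
    if 3 ≤ c then true
    else if PySem.Str.strIsdigit w then three_words_loop ws 0
    else three_words_loop ws (c + 1)

def three_words (string : String) : Bool :=
  three_words_loop (pvWords string) 0

-- ===== PORT B =====
def three_words_alt (string : String) : Bool :=
  let words := pvWords string
  (List.range (words.length - 2)).any (fun i =>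
    !(PySem.Str.strIsdigit (words.getD i "")) &&
    !(PySem.Str.strIsdigit (words.getD (i + 1) "")) &&
    !(PySem.Str.strIsdigit (words.getD (i + 2) "")))

-- ===== PRECONDITION & SPEC =====
-- On strings whose only run of three consecutive non-digit words sits at the very end
-- (no word after it), A returns False — its counter>=3 test only fires on a following
-- loop iteration — while B returns True, the intended detection of a run of three consecutive non-digit words.
def D_three_words (string : String) : Prop :=
  3 ≤ (pvWords string).length ∧
  (∀ j < (pvWords string).length, (pvWords string).length - 3 ≤ j →
    PySem.Str.strIsdigit ((pvWords string).getD j "") = false) ∧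
  (∀ i < (pvWords string).length, i + 3 < (pvWords string).length →
    ¬(PySem.Str.strIsdigit ((pvWords string).getD i "") = false ∧
      PySem.Str.strIsdigit ((pvWords string).getD (i + 1) "") = false ∧
      PySem.Str.strIsdigit ((pvWords string).getD (i + 2) "") = false))
instance (string : String) : Decidable (D_three_words string) := by
  unfold D_three_words; infer_instance

def Spec_three_words (string : String) (out : Bool) : Prop :=
  ¬ D_three_words string → out = three_words_alt string
instance (string : String) (out : Bool) : Decidable (Spec_three_words string out) := by
  unfold Spec_three_words; infer_instance

def pvDiffWitness_three_words : String := "a b c"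
def pvDiffWitnessOut_three_words : Bool × Bool := (false, true)

-- ===== CLAIM (what is proved, stated in full; the proofs are below) =====
def Claim_unchanged_three_words : Prop :=
  ∀ (string : String), Dom_three_words string → Spec_three_words string (three_words string)
def Claim_changed_three_words : Prop :=
  Dom_three_words (pvDiffWitness_three_words) ∧ D_three_words (pvDiffWitness_three_words) ∧
  three_words (pvDiffWitness_three_words) = pvDiffWitnessOut_three_words.1 ∧
  three_words_alt (pvDiffWitness_three_words) = pvDiffWitnessOut_three_words.2 ∧
  pvDiffWitnessOut_three_words.1 ≠ pvDiffWitnessOut_three_words.2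
def Claim_exact_three_words : Prop :=
  ∀ (string : String), Dom_three_words string → D_three_words string →
    three_words string ≠ three_words_alt string

-- ===== LEMMAS AND PROOFS =====

-- "word j of ws is not a digit-word"
def pvNd (ws : List String) (j : Nat) : Prop :=
  PySem.Str.strIsdigit (ws.getD j "") = false

lemma pvNd_cons (w : String) (ws : List String) (j : Nat) :
    pvNd (w :: ws) (j + 1) ↔ pvNd ws j := by
  simp [pvNd]

lemma pvNd_head_of_false (w : String) (ws : List String)
    (h : PySem.Str.strIsdigit w = false) : pvNd (w :: ws) 0 := by
  simpa [pvNd] using h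

lemma pvNd_head_not (w : String) (ws : List String)
    (h : PySem.Str.strIsdigit w = true) : ¬ pvNd (w :: ws) 0 := by
  have h' : PySem.Chars.strIsdigit w.toList = true := by simpa using h
  simp [pvNd, h']

-- characterization of A's loop: with credit c ≤ 3, it returns true iff either the first
-- 3-c words are non-digit and one more word follows, or some full window of three
-- non-digit words is followed by at least one word.
lemma loopA_char (ws : List String) (c : Nat) (hc : c ≤ 3) :
    three_words_loop ws (c : Int) = true ↔
      ((3 - c < ws.length ∧ ∀ j, j < 3 - c → pvNd ws j) ∨
       (∃ i, i + 3 < ws.length ∧ pvNd ws i ∧ pvNd ws (i + 1) ∧ pvNd ws (i + 2))) := by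
  induction ws generalizing c with
  | nil =>
    simp only [three_words_loop, List.length_nil]
    constructor
    · intro h; cases h
    · rintro (⟨h, _⟩ | ⟨i, hi, _⟩) <;> omega
  | cons w ws ih =>
    by_cases h3 : c = 3
    · subst h3
      simp only [three_words_loop]
      rw [if_pos (by norm_num)]
      constructor
      · intro _
        left
        refine ⟨by simp, ?_⟩
        intro j hj; omega
      · intro _; rfl
    · have hclt : c < 3 := by omega
      have hif : ¬ (3 ≤ (c : Int)) := by exact_mod_cast (by omega : ¬ (3 ≤ c))
      simp only [three_words_loop, if_neg hif]
      by_cases hd : PySem.Str.strIsdigit w = true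
      · rw [if_pos hd]
        have h0 : ((0 : Int) = ((0 : Nat) : Int)) := rfl
        rw [h0, ih 0 (by omega)]
        constructor
        · rintro (⟨hlen, hall⟩ | ⟨i, hi, h1, h2, h3'⟩)
          · -- prefix window of ws at 0 becomes window at 1 of w::ws
            right
            refine ⟨1, by simp only [List.length_cons]; omega, ?_, ?_, ?_⟩
            · exact (pvNd_cons w ws 0).mpr (hall 0 (by omega))
            · exact (pvNd_cons w ws 1).mpr (hall 1 (by omega))
            · exact (pvNd_cons w ws 2).mpr (hall 2 (by omega))
          · right
            refine ⟨i + 1, by simp only [List.length_cons]; omega, ?_, ?_, ?_⟩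
            · exact (pvNd_cons w ws i).mpr h1
            · exact (pvNd_cons w ws (i + 1)).mpr h2
            · exact (pvNd_cons w ws (i + 2)).mpr h3'
        · rintro (⟨hlen, hall⟩ | ⟨i, hi, h1, h2, h3'⟩)
          · exact absurd (hall 0 (by omega)) (pvNd_head_not w ws hd)
          · cases i with
            | zero => exact absurd h1 (pvNd_head_not w ws hd)
            | succ i =>
              right
              refine ⟨i, by simp only [List.length_cons] at hi; omega, ?_, ?_, ?_⟩
              · exact (pvNd_cons w ws i).mp h1
              · exact (pvNd_cons w ws (i + 1)).mp h2
              · exact (pvNd_cons w ws (i + 2)).mp h3'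
      · have hd' : PySem.Str.strIsdigit w = false := by
          cases h : PySem.Str.strIsdigit w
          · rfl
          · exact absurd h hd
        rw [if_neg hd]
        have hcast : ((c : Int) + 1) = (((c + 1 : Nat)) : Int) := by push_cast; ring
        rw [hcast, ih (c + 1) (by omega)]
        have hndw : pvNd (w :: ws) 0 := pvNd_head_of_false w ws hd'
        constructor
        · rintro (⟨hlen, hall⟩ | ⟨i, hi, h1, h2, h3'⟩)
          · left
            refine ⟨by simp only [List.length_cons]; omega, ?_⟩
            intro j hj
            cases j with
            | zero => exact hndw
            | succ j => exact (pvNd_cons w ws j).mpr (hall j (by omega))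
          · right
            refine ⟨i + 1, by simp only [List.length_cons]; omega, ?_, ?_, ?_⟩
            · exact (pvNd_cons w ws i).mpr h1
            · exact (pvNd_cons w ws (i + 1)).mpr h2
            · exact (pvNd_cons w ws (i + 2)).mpr h3'
        · rintro (⟨hlen, hall⟩ | ⟨i, hi, h1, h2, h3'⟩)
          · left
            refine ⟨by simp only [List.length_cons] at hlen; omega, ?_⟩
            intro j hj
            exact (pvNd_cons w ws j).mp (hall (j + 1) (by omega))
          · cases i with
            | zero =>
              -- the head window of w::ws supplies the (shorter) prefix condition
              left
              have h2' : pvNd ws 0 := (pvNd_cons w ws 0).mp h2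
              have h3'' : pvNd ws 1 := (pvNd_cons w ws 1).mp h3'
              refine ⟨by simp only [List.length_cons] at hi; omega, ?_⟩
              intro j hj
              have hj2 : j = 0 ∨ j = 1 := by omega
              rcases hj2 with h | h <;> subst h
              · exact h2'
              · exact h3''
            | succ i =>
              right
              refine ⟨i, by simp only [List.length_cons] at hi; omega, ?_, ?_, ?_⟩
              · exact (pvNd_cons w ws i).mp h1
              · exact (pvNd_cons w ws (i + 1)).mp h2
              · exact (pvNd_cons w ws (i + 2)).mp h3'

lemma A_char (s : String) :
    three_words s = true ↔
      ∃ i, i + 3 < (pvWords s).length ∧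
        pvNd (pvWords s) i ∧ pvNd (pvWords s) (i + 1) ∧ pvNd (pvWords s) (i + 2) := by
  unfold three_words
  have h0 : ((0 : Int) = ((0 : Nat) : Int)) := rfl
  rw [h0, loopA_char _ 0 (by omega)]
  constructor
  · rintro (⟨hlen, hall⟩ | h)
    · exact ⟨0, by omega, hall 0 (by omega), hall 1 (by omega), hall 2 (by omega)⟩
    · exact h
  · intro h; right; exact h

lemma B_char (s : String) :
    three_words_alt s = true ↔
      ∃ i, i + 2 < (pvWords s).length ∧
        pvNd (pvWords s) i ∧ pvNd (pvWords s) (i + 1) ∧ pvNd (pvWords s) (i + 2) := by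
  unfold three_words_alt
  simp only [List.any_eq_true, List.mem_range, Bool.and_eq_true, Bool.not_eq_eq_eq_not,
    Bool.not_true, pvNd]
  constructor
  · rintro ⟨i, hi, ⟨h1, h2⟩, h3⟩
    exact ⟨i, by omega, h1, h2, h3⟩
  · rintro ⟨i, hi, h1, h2, h3⟩
    exact ⟨i, by omega, ⟨h1, h2⟩, h3⟩

-- ===== VERDICT (by name: the statement is the Claim_ definition above) =====
theorem three_words_spec : Claim_unchanged_three_words := by
  intro s _
  unfold Spec_three_words
  intro hD
  by_cases hA : three_words s = true
  · rw [hA]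
    obtain ⟨i, hi, h1, h2, h3⟩ := (A_char s).mp hA
    exact ((B_char s).mpr ⟨i, by omega, h1, h2, h3⟩).symm
  · by_cases hB : three_words_alt s = true
    · -- A false, B true: the input would lie inside D_, contradiction
      exfalso
      apply hD
      obtain ⟨i, hi, h1, h2, h3⟩ := (B_char s).mp hB
      have hAi : ∀ i', ¬(i' + 3 < (pvWords s).length ∧
          pvNd (pvWords s) i' ∧ pvNd (pvWords s) (i' + 1) ∧ pvNd (pvWords s) (i' + 2)) := by
        intro i' hcontra
        exact hA ((A_char s).mpr ⟨i', hcontra⟩)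
      have hi3 : ¬ (i + 3 < (pvWords s).length) := fun h => hAi i ⟨h, h1, h2, h3⟩
      refine ⟨by omega, ?_, ?_⟩
      · intro j hj2 hj1
        have : j = i ∨ j = i + 1 ∨ j = i + 2 := by omega
        rcases this with h | h | h <;> subst h
        · exact h1
        · exact h2
        · exact h3
      · intro i' _ hlt hcontra
        exact hAi i' ⟨hlt, hcontra⟩
    · have hA' : three_words s = false := by
        cases h : three_words s
        · rfl
        · exact absurd h hA
      have hB' : three_words_alt s = false := by
        cases h : three_words_alt s
        · rfl
        · exact absurd h hB
      rw [hA', hB']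

theorem three_words_changed : Claim_changed_three_words := by
  unfold Claim_changed_three_words; decide

theorem three_words_tight : Claim_exact_three_words := by
  intro s _ hD
  obtain ⟨hlen, hlast, hnowin⟩ := hD
  have hB : three_words_alt s = true := by
    apply (B_char s).mpr
    refine ⟨(pvWords s).length - 3, by omega, ?_, ?_, ?_⟩ <;>
      exact hlast _ (by omega) (by omega)
  have hA : three_words s = false := by
    cases h : three_words s
    · rfl
    · exfalso
      obtain ⟨i, hi, h1, h2, h3⟩ := (A_char s).mp h
      exact hnowin i (by omega) hi ⟨h1, h2, h3⟩
  rw [hA, hB]; simp
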